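-- pv_equiv track=rewrite | github.com/MahmoudManfi/NumericalAnalysis | Interpolation/interpolation.py | get_equ
-- ===== SOURCE A (Python) =====
-- def build_parentheses(x):
--     container = []
--     for i in range(len(x)):
--         if x[i] == 0:
--             container.append('*x')
--         else:
--             container.append('*(x - ' + str(x[i]) + ')')
--     return container
--
-- def sign_string(number):
--     res = ''
--     if number > 0:
--         res += ' + '
--     else:
--         res += ' - '
--     res += str(abs(number))
--     return res
--
-- def get_equ(x, b):
--     container = build_parentheses(x)
--     size = len(x)
--     res = ''
--     for i in range(size):
--         if b[i] == 0:
--             continue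
--         if len(res) == 0:
--             res += str(b[i])
--         else:
--             res += sign_string(b[i])
--         for j in range(size):
--             if i == j:
--                 continue
--             res += container[j]
--     return res
-- ===== SOURCE B (Python) =====
-- def _prefixes(container):
--     # pre[i] = ''.join(container[:i])
--     pre = ['']
--     for c in container:
--         pre.append(pre[-1] + c)
--     return pre
--
-- def _suffixes(container):
--     # suf[i] = ''.join(container[i:])
--     rsuf = ['']
--     for c in reversed(container):
--         rsuf.append(c + rsuf[-1])
--     rsuf.reverse()
--     return rsuf
--
-- def get_equ(x, b):
--     container = ['*x' if v == 0 else '*(x - ' + str(v) + ')' for v in x]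
--     pre = _prefixes(container)
--     suf = _suffixes(container)
--     out = ''
--     for c, p, s in zip(b, pre, suf[1:]):
--         if c == 0:
--             continue
--         if out:
--             out += (' + ' if c > 0 else ' - ') + str(abs(c))
--         else:
--             out += str(c)
--         out += p + s
--     return out
-- ===== Notes on version B (the rewrite author's own statement) =====
-- stated objective: alternative
-- what changed: B precomputes prefix-join and suffix-join tables of the parenthesis factors in two linear passes and emits each nonzero term with one table lookup (iterating zip(b, pre, suf[1:])), replacing A's inner j-rescan of all the factors for every term; measured ~2x on the timing inputs but not confirmed at the largest size (the output itself is quadratic), so no speed is claimed.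
import Mathlib
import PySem

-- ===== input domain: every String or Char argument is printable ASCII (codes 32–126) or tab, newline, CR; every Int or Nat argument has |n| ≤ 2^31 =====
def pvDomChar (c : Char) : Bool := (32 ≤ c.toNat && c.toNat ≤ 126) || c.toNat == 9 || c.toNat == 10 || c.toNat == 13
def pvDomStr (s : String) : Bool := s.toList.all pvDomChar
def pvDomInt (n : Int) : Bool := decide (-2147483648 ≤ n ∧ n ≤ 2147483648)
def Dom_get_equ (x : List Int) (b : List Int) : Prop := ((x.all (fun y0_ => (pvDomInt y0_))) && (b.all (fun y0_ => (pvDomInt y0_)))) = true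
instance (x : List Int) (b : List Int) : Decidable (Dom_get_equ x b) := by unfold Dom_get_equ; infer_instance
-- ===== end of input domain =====

-- B precomputes prefix-join and suffix-join tables of the parenthesis factors in two passes
-- and emits each term with one table lookup instead of A's inner j-rescan (objective: alternative).
-- Python strings are modelled as List Char (PySem convention) and wrapped by String.ofList at the end.

-- ===== PORT A =====
def pvBuildParentheses (x : List Int) : List (List Char) :=
  (PySem.List.pyRange 0 (PySem.List.len x) 1).foldl
    (fun container i =>
      if PySem.List.pyGetD x i 0 = 0 then container ++ ["*x".toList]
      else container ++ ["*(x - ".toList ++ PySem.Int.toChars (PySem.List.pyGetD x i 0) ++ ")".toList]) []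

def pvSignString (number : Int) : List Char :=
  let res : List Char := []
  let res := if 0 < number then res ++ " + ".toList else res ++ " - ".toList
  res ++ PySem.Int.toChars |number|

def get_equ (x : List Int) (b : List Int) : String :=
  let container := pvBuildParentheses x
  let size := PySem.List.len x
  let res := (PySem.List.pyRange 0 size 1).foldl
    (fun res i =>
      if PySem.List.pyGetD b i 0 = 0 then res
      else
        let res := if res.length = 0 then res ++ PySem.Int.toChars (PySem.List.pyGetD b i 0)
                   else res ++ pvSignString (PySem.List.pyGetD b i 0)
        (PySem.List.pyRange 0 size 1).foldl
          (fun res j => if i = j then res else res ++ PySem.List.pyGetD container j []) res)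
    ([] : List Char)
  String.ofList res

-- ===== PORT B =====
def pvPrefixes (container : List (List Char)) : List (List Char) :=
  container.foldl (fun pre c => pre ++ [PySem.List.pyGetD pre (-1) [] ++ c]) [[]]

def pvSuffixes (container : List (List Char)) : List (List Char) :=
  (container.reverse.foldl (fun rsuf c => rsuf ++ [c ++ PySem.List.pyGetD rsuf (-1) []]) [[]]).reverse

def get_equ_alt (x : List Int) (b : List Int) : String :=
  let container := x.map (fun v => if v = 0 then "*x".toList
                                   else "*(x - ".toList ++ PySem.Int.toChars v ++ ")".toList)
  let pre := pvPrefixes container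
  let suf := pvSuffixes container
  let out := (b.zip (pre.zip (PySem.List.slice suf (some 1) none))).foldl
    (fun out t =>
      if t.1 = 0 then out
      else
        (if out = [] then out ++ PySem.Int.toChars t.1
         else out ++ ((if 0 < t.1 then " + ".toList else " - ".toList) ++ PySem.Int.toChars |t.1|))
        ++ t.2.1 ++ t.2.2) ([] : List Char)
  String.ofList out

-- ===== PRECONDITION & SPEC =====
-- A indexes b[i] for every i < len(x), so it raises IndexError iff len(b) < len(x): exactly those inputs are excluded.
def Pre_get_equ (x : List Int) (b : List Int) : Prop := x.length ≤ b.length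
instance (x : List Int) (b : List Int) : Decidable (Pre_get_equ x b) := by unfold Pre_get_equ; infer_instance
def pvWitness_get_equ : List Int × List Int := ([0, 2, -3], [1, 0, -4])
def Spec_get_equ (x : List Int) (b : List Int) (out : String) : Prop := out = get_equ_alt x b
instance (x : List Int) (b : List Int) (out : String) : Decidable (Spec_get_equ x b out) := by unfold Spec_get_equ; infer_instance

-- ===== CLAIM (what is proved, stated in full; the proofs are below) =====
def Claim_equal_get_equ : Prop := ∀ (x : List Int) (b : List Int), Dom_get_equ x b → Pre_get_equ x b → Spec_get_equ x b (get_equ x b)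

-- ===== LEMMAS AND PROOFS =====

-- the common container both ports build
def pvCont (x : List Int) : List (List Char) :=
  x.map (fun v => if v = 0 then "*x".toList
                  else "*(x - ".toList ++ PySem.Int.toChars v ++ ")".toList)

theorem pvBuildParentheses_eq (x : List Int) : pvBuildParentheses x = pvCont x := by
  unfold pvBuildParentheses pvCont
  have hstep : (fun (container : List (List Char)) (i : Int) =>
      if PySem.List.pyGetD x i 0 = 0 then container ++ ["*x".toList]
      else container ++ ["*(x - ".toList ++ PySem.Int.toChars (PySem.List.pyGetD x i 0) ++ ")".toList])
    = fun container i => container ++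
      [if PySem.List.pyGetD x i 0 = 0 then "*x".toList
       else "*(x - ".toList ++ PySem.Int.toChars (PySem.List.pyGetD x i 0) ++ ")".toList] := by
    funext container i
    split <;> rfl
  rw [hstep, PySem.List.foldl_append_singleton_eq_map]
  have hmap : (PySem.List.pyRange 0 (PySem.List.len x) 1).map
      (fun i => if PySem.List.pyGetD x i 0 = 0 then "*x".toList
                else "*(x - ".toList ++ PySem.Int.toChars (PySem.List.pyGetD x i 0) ++ ")".toList)
      = ((PySem.List.pyRange 0 (PySem.List.len x) 1).map (fun j => PySem.List.pyGetD x j 0)).map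
          (fun v => if v = 0 then "*x".toList
                    else "*(x - ".toList ++ PySem.Int.toChars v ++ ")".toList) := by
    rw [List.map_map]
    rfl
  rw [hmap, PySem.List.map_pyGetD_pyRange_zero]
  simp

-- prefix scan characterisation
def pvScanPre (t : List Char) : List (List Char) → List (List Char)
  | [] => [t]
  | c :: cs => t :: pvScanPre (t ++ c) cs

def pvScanSuf (t : List Char) : List (List Char) → List (List Char)
  | [] => [t]
  | c :: cs => t :: pvScanSuf (c ++ t) cs

theorem pvFoldlPre (cs : List (List Char)) : ∀ (A : List (List Char)) (t : List Char),
    cs.foldl (fun pre c => pre ++ [PySem.List.pyGetD pre (-1) [] ++ c]) (A ++ [t])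
      = A ++ pvScanPre t cs := by
  induction cs with
  | nil => intro A t; simp [pvScanPre]
  | cons c cs ih =>
    intro A t
    simp only [List.foldl_cons, PySem.List.pyGetD_neg_one_append_singleton]
    rw [ih (A ++ [t]) (t ++ c)]
    simp [pvScanPre]

theorem pvFoldlSuf (cs : List (List Char)) : ∀ (A : List (List Char)) (t : List Char),
    cs.foldl (fun rsuf c => rsuf ++ [c ++ PySem.List.pyGetD rsuf (-1) []]) (A ++ [t])
      = A ++ pvScanSuf t cs := by
  induction cs with
  | nil => intro A t; simp [pvScanSuf]
  | cons c cs ih =>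
    intro A t
    simp only [List.foldl_cons, PySem.List.pyGetD_neg_one_append_singleton]
    rw [ih (A ++ [t]) (c ++ t)]
    simp [pvScanSuf]

theorem pvScanPre_length (cs : List (List Char)) : ∀ t, (pvScanPre t cs).length = cs.length + 1 := by
  induction cs with
  | nil => simp [pvScanPre]
  | cons c cs ih => intro t; simp [pvScanPre, ih]

theorem pvScanSuf_length (cs : List (List Char)) : ∀ t, (pvScanSuf t cs).length = cs.length + 1 := by
  induction cs with
  | nil => simp [pvScanSuf]
  | cons c cs ih => intro t; simp [pvScanSuf, ih]

theorem pvScanPre_getD (cs : List (List Char)) : ∀ (t : List Char) (k : Nat), k ≤ cs.length →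
    (pvScanPre t cs).getD k [] = t ++ (cs.take k).flatten := by
  induction cs with
  | nil =>
    intro t k hk
    have : k = 0 := by simpa using hk
    subst this; simp [pvScanPre]
  | cons c cs ih =>
    intro t k hk
    cases k with
    | zero => simp [pvScanPre]
    | succ k =>
      have h := ih (t ++ c) k (by simpa using hk)
      simp only [pvScanPre, List.getD_cons_succ] at *
      rw [h]; simp

theorem pvScanSuf_getD (cs : List (List Char)) : ∀ (t : List Char) (k : Nat), k ≤ cs.length →
    (pvScanSuf t cs).getD k [] = ((cs.take k).reverse).flatten ++ t := by
  induction cs with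
  | nil =>
    intro t k hk
    have : k = 0 := by simpa using hk
    subst this; simp [pvScanSuf]
  | cons c cs ih =>
    intro t k hk
    cases k with
    | zero => simp [pvScanSuf]
    | succ k =>
      have h := ih (c ++ t) k (by simpa using hk)
      simp only [pvScanSuf, List.getD_cons_succ] at *
      rw [h]; simp

theorem pvPrefixes_getD (cs : List (List Char)) (k : Nat) (hk : k ≤ cs.length) :
    (pvPrefixes cs).getD k [] = (cs.take k).flatten := by
  have e : pvPrefixes cs = pvScanPre [] cs := by
    simpa [pvPrefixes] using pvFoldlPre cs [] []
  rw [e]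
  simpa using pvScanPre_getD cs [] k hk

theorem pvSuffixes_length (cs : List (List Char)) : (pvSuffixes cs).length = cs.length + 1 := by
  have e : pvSuffixes cs = (pvScanSuf [] cs.reverse).reverse := by
    simpa [pvSuffixes] using congrArg List.reverse (pvFoldlSuf cs.reverse [] [])
  rw [e]
  simp [pvScanSuf_length]

theorem pvPrefixes_length (cs : List (List Char)) : (pvPrefixes cs).length = cs.length + 1 := by
  have e : pvPrefixes cs = pvScanPre [] cs := by
    simpa [pvPrefixes] using pvFoldlPre cs [] []
  rw [e, pvScanPre_length]

theorem pvSuffixes_getD (cs : List (List Char)) (k : Nat) (hk : k ≤ cs.length) :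
    (pvSuffixes cs).getD k [] = (cs.drop k).flatten := by
  have e : pvSuffixes cs = (pvScanSuf [] cs.reverse).reverse := by
    simpa [pvSuffixes] using congrArg List.reverse (pvFoldlSuf cs.reverse [] [])
  set l := pvScanSuf [] cs.reverse with hl
  have hlen : l.length = cs.length + 1 := by
    rw [hl, pvScanSuf_length]; simp
  have hk1 : k < l.reverse.length := by simp [hlen]; omega
  have hk2 : cs.length - k < l.length := by omega
  rw [e, List.getD_eq_getElem _ _ hk1, List.getElem_reverse]
  have hidx : l.length - 1 - k = cs.length - k := by omega
  rw [← List.getD_eq_getElem _ ([] : List Char) (by omega : l.length - 1 - k < l.length)]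
  rw [hidx, hl]
  rw [pvScanSuf_getD cs.reverse [] (cs.length - k) (by simp)]
  rw [List.take_reverse]
  have : cs.length - (cs.length - k) = k := by omega
  rw [this]
  simp

-- indices a..a+n of c, read through pyGetD
theorem pvMapGet (c : List (List Char)) : ∀ (n a : Nat), a + n ≤ c.length →
    (PySem.List.pyRange a (a + n) 1).map (fun j => PySem.List.pyGetD c j []) = (c.drop a).take n := by
  intro n
  induction n with
  | zero =>
    intro a ha
    rw [PySem.List.pyRange_one_eq_nil (by omega)]
    simp
  | succ n ih =>
    intro a ha
    have hcons : PySem.List.pyRange (a : Int) ((a : Int) + ((n : Int) + 1)) 1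
        = (a : Int) :: PySem.List.pyRange ((a : Int) + 1) ((a : Int) + ((n : Int) + 1)) 1 :=
      PySem.List.pyRange_one_cons (by omega)
    have hsh : (a : Int) + ((n : Int) + 1) = ((a + 1 : Nat) : Int) + (n : Int) := by push_cast; ring
    have ha' : a < c.length := by omega
    have hdr := List.drop_eq_getElem_cons ha'
    rw [show ((a : Int) + ((n : Nat) + 1 : Nat)) = (a : Int) + ((n : Int) + 1) by push_cast; ring, hcons]
    rw [List.map_cons, hsh, show ((a:Int) + 1) = ((a+1 : Nat) : Int) by push_cast; ring,
        ih (a + 1) (by omega), hdr]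
    simp [PySem.List.pyGetD_natCast, List.getElem?_eq_getElem ha']
    rw [hdr, List.take_succ_cons]

-- A's inner j-loop appends every container[j] with j ≠ i
theorem pvInner (c : List (List Char)) (i : Nat) (hi : i < c.length) (r : List Char) :
    (PySem.List.pyRange 0 (c.length : Int) 1).foldl
        (fun r j => if (i : Int) = j then r else r ++ PySem.List.pyGetD c j []) r
      = r ++ (c.take i).flatten ++ (c.drop (i + 1)).flatten := by
  have hstep : (fun (r : List Char) (j : Int) => if (i : Int) = j then r else r ++ PySem.List.pyGetD c j [])
      = fun r j => r ++ (if (i : Int) = j then [] else PySem.List.pyGetD c j []) := by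
    funext r j; split <;> simp
  rw [hstep, PySem.List.foldl_append_eq_flatMap, List.append_assoc]
  congr 1
  rw [PySem.List.pyRange_one_append 0 (i : Int) (c.length : Int) (by omega) (by omega),
      PySem.List.pyRange_one_append (i : Int) ((i : Int) + 1) (c.length : Int) (by omega) (by omega),
      List.flatMap_append, List.flatMap_append, PySem.List.pyRange_one_singleton,
      List.flatMap_singleton]
  have h1 : (PySem.List.pyRange 0 (i : Int) 1).flatMap
      (fun j => if (i : Int) = j then [] else PySem.List.pyGetD c j []) = (c.take i).flatten := by
    rw [List.flatMap_def]
    have hm : (PySem.List.pyRange 0 (i : Int) 1).map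
        (fun j => if (i : Int) = j then [] else PySem.List.pyGetD c j [])
        = (PySem.List.pyRange 0 (i : Int) 1).map (fun j => PySem.List.pyGetD c j []) := by
      apply List.map_congr_left
      intro j hj
      have hj' : 0 ≤ j ∧ j < (i : Int) := (PySem.List.mem_pyRange_one).1 hj
      rw [if_neg (by omega)]
    rw [hm]
    exact congrArg List.flatten (by simpa using pvMapGet c i 0 (by omega))
  have h2 : (PySem.List.pyRange ((i : Int) + 1) (c.length : Int) 1).flatMap
      (fun j => if (i : Int) = j then [] else PySem.List.pyGetD c j []) = (c.drop (i + 1)).flatten := by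
    rw [List.flatMap_def]
    have hm : (PySem.List.pyRange ((i : Int) + 1) (c.length : Int) 1).map
        (fun j => if (i : Int) = j then [] else PySem.List.pyGetD c j [])
        = (PySem.List.pyRange ((i : Int) + 1) (c.length : Int) 1).map (fun j => PySem.List.pyGetD c j []) := by
      apply List.map_congr_left
      intro j hj
      have hj' : (i : Int) + 1 ≤ j ∧ j < (c.length : Int) := (PySem.List.mem_pyRange_one).1 hj
      rw [if_neg (by omega)]
    rw [hm]
    have := pvMapGet c (c.length - (i + 1)) (i + 1) (by omega)
    rw [show ((i + 1 : Nat) : Int) + ((c.length - (i + 1) : Nat) : Int) = (c.length : Int) by omega] at this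
    rw [show ((i : Int) + 1) = ((i + 1 : Nat) : Int) by push_cast; ring, this]
    rw [List.take_of_length_le (by simp)]
  rw [h1, h2]
  simp

-- ===== VERDICT (by name: the statement is the Claim_ definition above) =====
-- the two emitted-head expressions agree, and the per-term tails agree
theorem pvMain (x b : List Int) (hpre : x.length ≤ b.length) :
    (PySem.List.pyRange 0 (PySem.List.len x) 1).foldl
      (fun res i =>
        if PySem.List.pyGetD b i 0 = 0 then res
        else
          let res := if res.length = 0 then res ++ PySem.Int.toChars (PySem.List.pyGetD b i 0)
                     else res ++ pvSignString (PySem.List.pyGetD b i 0)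
          (PySem.List.pyRange 0 (PySem.List.len x) 1).foldl
            (fun res j => if i = j then res else res ++ PySem.List.pyGetD (pvCont x) j []) res)
      ([] : List Char)
    = (b.zip ((pvPrefixes (pvCont x)).zip (PySem.List.slice (pvSuffixes (pvCont x)) (some 1) none))).foldl
      (fun out t =>
        if t.1 = 0 then out
        else
          (if out = [] then out ++ PySem.Int.toChars t.1
           else out ++ ((if 0 < t.1 then " + ".toList else " - ".toList) ++ PySem.Int.toChars |t.1|))
          ++ t.2.1 ++ t.2.2) ([] : List Char) := by
  set c := pvCont x with hc
  have hcl : c.length = x.length := by simp [hc, pvCont]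
  have hzip : b.zip ((pvPrefixes c).zip (PySem.List.slice (pvSuffixes c) (some 1) none))
      = (List.range x.length).map
          (fun k => (b.getD k 0, ((pvPrefixes c).getD k [], (pvSuffixes c).getD (k + 1) []))) := by
    rw [PySem.List.slice_from (pvSuffixes c) (by norm_num : (0 : Int) ≤ 1), Int.toNat_one]
    apply List.ext_getElem
    · simp [pvPrefixes_length, pvSuffixes_length, hcl]; omega
    · intro k h1 h2
      have hk : k < x.length := by
        simpa using h2
      have hkb : k < b.length := by omega
      have hkp : k < (pvPrefixes c).length := by rw [pvPrefixes_length]; omega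
      have hks' : 1 + k < (pvSuffixes c).length := by rw [pvSuffixes_length]; omega
      simp only [List.getElem_zip, List.getElem_map, List.getElem_range, List.getElem_drop]
      refine Prod.ext ?_ (Prod.ext ?_ ?_)
      · exact (List.getD_eq_getElem b 0 hkb).symm
      · exact (List.getD_eq_getElem (pvPrefixes c) [] hkp).symm
      · show (pvSuffixes c)[1 + k] = (pvSuffixes c).getD (k + 1) []
        rw [List.getD_eq_getElem (pvSuffixes c) [] (by rw [pvSuffixes_length]; omega)]
        congr 1
        omega
  rw [hzip, PySem.List.len_eq, PySem.List.pyRange_zero_nat, List.foldl_map, List.foldl_map]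
  apply PySem.List.foldl_congr_mem
  intro acc k hk
  have hkn : k < x.length := List.mem_range.1 hk
  rw [← PySem.List.pyRange_zero_nat]
  simp only [PySem.List.pyGetD_natCast]
  by_cases h0 : b.getD k 0 = 0
  · rw [if_pos h0, if_pos h0]
  · rw [if_neg h0, if_neg h0]
    have hinner := pvInner c k (by omega) (if acc.length = 0 then acc ++ PySem.Int.toChars (b.getD k 0)
      else acc ++ pvSignString (b.getD k 0))
    rw [show ((x.length : Int)) = ((c.length : Int)) by rw [hcl]]
    rw [hinner]
    rw [pvPrefixes_getD c k (by omega), pvSuffixes_getD c (k + 1) (by omega)]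
    simp only [List.length_eq_zero_iff]
    simp [pvSignString, List.append_assoc]

-- ===== final assembly =====
theorem get_equ_spec : Claim_equal_get_equ := by
  intro x b _ hpre
  unfold Spec_get_equ get_equ get_equ_alt
  rw [pvBuildParentheses_eq]
  exact congrArg String.ofList (pvMain x b hpre)
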